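-- pv_equiv track=rewrite | github.com/MThushar123/Python_Tech_Training | mar23.py | show_steps
-- ===== SOURCE A (Python) =====
-- def show_steps(num):
--     current = num  # Track CURRENT number
--     steps = []
--
--     while current >= 10:
--         digit_sum = 0
--         temp = current
--
--         # Sum all digits
--         while temp > 0:
--             digit_sum += temp % 10
--             temp //= 10
--
--         steps.append(f"{current} → {digit_sum}")
--         current = digit_sum  # Update current!
--
--     steps.append(f"Final: {current}")
--     return steps
-- ===== SOURCE B (Python) =====
-- def show_steps(num):
--     # Recursive reduction; digit sum via decimal-string traversal instead of %10 // 10 arithmetic.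
--     if num < 10:
--         return [f"Final: {num}"]
--     digit_sum = sum(int(d) for d in str(num))
--     return [f"{num} \u2192 {digit_sum}"] + show_steps(digit_sum)
-- ===== Notes on version B (the rewrite author's own statement) =====
-- stated objective: idiomatic
-- what changed: Replaces A's iterative while-loop with list accumulator and arithmetic (%10, //10) inner digit-sum loop by a recursive reduction whose digit sum is computed by traversing the decimal string of the number (sum(int(d) for d in str(num))).
import Mathlib
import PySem

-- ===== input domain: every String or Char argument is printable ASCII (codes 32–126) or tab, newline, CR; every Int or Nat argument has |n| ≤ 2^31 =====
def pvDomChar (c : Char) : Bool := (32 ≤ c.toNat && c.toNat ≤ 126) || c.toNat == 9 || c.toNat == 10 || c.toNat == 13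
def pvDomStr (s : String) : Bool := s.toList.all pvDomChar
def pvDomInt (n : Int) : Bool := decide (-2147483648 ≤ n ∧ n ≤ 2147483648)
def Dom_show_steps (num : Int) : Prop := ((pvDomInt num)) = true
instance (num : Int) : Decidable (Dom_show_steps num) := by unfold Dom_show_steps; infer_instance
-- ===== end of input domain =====

-- B replaces A's iterative accumulation and arithmetic (%10, //10) digit-sum loop by a
-- recursive reduction whose digit sum traverses the decimal string of the number (idiomatic).


-- ===== PORT A =====
-- A's inner loop (fuel is only a totality guard; fuel = temp.toNat always suffices, see sumDigitsLoop_eq):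
--   while temp > 0: digit_sum += temp % 10; temp //= 10
def sumDigitsLoop : Nat → Int → Int → Int
  | 0, digit_sum, _ => digit_sum
  | fuel + 1, digit_sum, temp =>
    if temp > 0 then
      sumDigitsLoop fuel (digit_sum + PySem.Int.mod temp 10) (PySem.Int.floordiv temp 10)
    else digit_sum

-- A's outer loop (fuel is only a totality guard; fuel = current.toNat + 1 always suffices, see loop_eq):
--   while current >= 10: … steps.append(f"{current} → {digit_sum}") …; then append the final line
def showStepsLoop : Nat → Int → List String → List String
  | 0, _, steps => steps
  | fuel + 1, current, steps =>
    if current ≥ 10 then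
      let digit_sum := sumDigitsLoop current.toNat 0 current
      showStepsLoop fuel digit_sum (steps ++ [PySem.Int.toStr current ++ " → " ++ PySem.Int.toStr digit_sum])
    else steps ++ ["Final: " ++ PySem.Int.toStr current]

def show_steps (num : Int) : List String :=
  showStepsLoop (num.toNat + 1) num []

-- ===== PORT B =====
-- B's digit sum:  sum(int(d) for d in str(num)).  int(d) for the single digit character d is
-- ported as its character code minus 48 — exact, since str(num) here consists of digits only.
def strDigitSum (num : Int) : Int :=
  ((PySem.Int.toStr num).toList.map (fun d => (d.toNat : Int) - 48)).sum

-- B's recursion (fuel is only a totality guard; fuel = num.toNat + 1 always suffices, see altGo_congr)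
def showStepsAltGo : Nat → Int → List String
  | 0, _ => []
  | fuel + 1, num =>
    if num < 10 then ["Final: " ++ PySem.Int.toStr num]
    else
      let digit_sum := strDigitSum num
      (PySem.Int.toStr num ++ " → " ++ PySem.Int.toStr digit_sum) :: showStepsAltGo fuel digit_sum

def show_steps_alt (num : Int) : List String :=
  showStepsAltGo (num.toNat + 1) num

-- ===== PRECONDITION & SPEC =====
def Spec_show_steps (num : Int) (out : List String) : Prop := out = show_steps_alt num
instance (num : Int) (out : List String) : Decidable (Spec_show_steps num out) := by unfold Spec_show_steps; infer_instance

-- ===== CLAIM (what is proved, stated in full; the proofs are below) =====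
def Claim_equal_show_steps : Prop := ∀ (num : Int), Dom_show_steps num → Spec_show_steps num (show_steps num)

-- ===== LEMMAS AND PROOFS =====

-- proof-side digit sum of a natural number
def digsum (n : Nat) : Nat :=
  if n = 0 then 0 else n % 10 + digsum (n / 10)
termination_by n
decreasing_by exact Nat.div_lt_self (by omega) (by norm_num)

lemma digsum_zero : digsum 0 = 0 := by rw [digsum]; simp

lemma digsum_pos (n : Nat) (h : n ≠ 0) : digsum n = n % 10 + digsum (n / 10) := by
  rw [digsum, if_neg h]

lemma digsum_le (n : Nat) : digsum n ≤ n := by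
  induction n using Nat.strong_induction_on with
  | _ n ih =>
    rw [digsum]
    split
    · omega
    · have h10 : n / 10 < n := Nat.div_lt_self (by omega) (by norm_num)
      have := ih (n / 10) h10
      omega

lemma digsum_lt (n : Nat) (h : 10 ≤ n) : digsum n < n := by
  rw [digsum_pos n (by omega)]
  have := digsum_le (n / 10)
  omega

-- A's inner loop computes digsum whenever the fuel is at least temp.toNat
lemma sumDigitsLoop_eq : ∀ (fuel : Nat) (t ds : Int), 0 ≤ t → t.toNat ≤ fuel →
    sumDigitsLoop fuel ds t = ds + (digsum t.toNat : Int) := by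
  intro fuel
  induction fuel with
  | zero =>
    intro t ds h0 hf
    have ht : t.toNat = 0 := by omega
    rw [sumDigitsLoop, ht, digsum_zero]
    simp
  | succ f ih =>
    intro t ds h0 hf
    rw [sumDigitsLoop]
    split
    · rename_i hpos
      have hcast : t = ((t.toNat : Nat) : Int) := by omega
      have hdiv : PySem.Int.floordiv t 10 = ((t.toNat / 10 : Nat) : Int) := by
        rw [hcast]; exact_mod_cast PySem.Int.floordiv_natCast t.toNat 10
      have hmod : PySem.Int.mod t 10 = ((t.toNat % 10 : Nat) : Int) := by
        rw [hcast]; exact_mod_cast PySem.Int.mod_natCast t.toNat 10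
      rw [hmod, hdiv, ih ((t.toNat / 10 : Nat) : Int) _ (by positivity) (by omega),
        digsum_pos t.toNat (by omega)]
      simp only [Int.toNat_natCast]
      push_cast
      ring
    · rename_i hnp
      have ht : t.toNat = 0 := by omega
      rw [ht, digsum_zero]
      simp

lemma toDigitsCore_charSum (fuel : Nat) : ∀ (n : Nat) (acc : List Char), n < fuel →
    ((Nat.toDigitsCore 10 fuel n acc).map (fun d => (d.toNat : Int) - 48)).sum
      = (digsum n : Int) + ((acc.map (fun d => (d.toNat : Int) - 48)).sum) := by
  induction fuel with
  | zero => intro n acc h; omega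
  | succ f ih =>
    intro n acc h
    rw [Nat.toDigitsCore]
    have hd : ((Nat.digitChar (n % 10)).toNat : Int) - 48 = (n % 10 : Nat) := by
      have h10 : n % 10 < 10 := Nat.mod_lt _ (by norm_num)
      interval_cases h' : (n % 10) <;> decide
    split
    · rename_i hz
      simp only [List.map_cons, List.sum_cons, hd]
      by_cases h0 : n = 0
      · subst h0; simp [digsum_zero]
      · rw [digsum_pos n h0, hz, digsum_zero]; simp
    · rename_i hnz
      rw [ih (n / 10) _ (by omega)]
      simp only [List.map_cons, List.sum_cons, hd]
      rw [digsum_pos n (by omega)]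
      push_cast
      ring

lemma strDigitSum_eq (n : Int) (h : 0 ≤ n) : strDigitSum n = (digsum n.toNat : Int) := by
  unfold strDigitSum
  rw [PySem.Int.toList_toStr]
  unfold PySem.Int.toChars
  rw [if_neg (by omega)]
  unfold Nat.toDigits
  rw [toDigitsCore_charSum (n.toNat + 1) n.toNat [] (by omega)]
  simp

lemma strDigitSum_lt (n : Int) (h : 10 ≤ n) : (strDigitSum n).toNat < n.toNat := by
  rw [strDigitSum_eq n (by omega)]
  have := digsum_lt n.toNat (by omega)
  omega

lemma sums_agree (c : Int) (h : 0 ≤ c) : sumDigitsLoop c.toNat 0 c = strDigitSum c := by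
  rw [sumDigitsLoop_eq c.toNat c 0 h (by omega), strDigitSum_eq c h]
  simp

-- B's recursion does not depend on the fuel as long as it exceeds num.toNat
lemma altGo_congr : ∀ (f1 f2 : Nat) (n : Int), n.toNat < f1 → n.toNat < f2 →
    showStepsAltGo f1 n = showStepsAltGo f2 n := by
  intro f1
  induction f1 with
  | zero => intro f2 n h1 h2; omega
  | succ f ih =>
    intro f2 n h1 h2
    cases f2 with
    | zero => omega
    | succ f2' =>
      rw [showStepsAltGo, showStepsAltGo]
      by_cases hn : n < 10
      · rw [if_pos hn, if_pos hn]
      · rw [if_neg hn, if_neg hn]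
        simp only
        have hlt := strDigitSum_lt n (by omega)
        rw [ih f2' (strDigitSum n) (by omega) (by omega)]

lemma loop_eq : ∀ (fuel : Nat) (c : Int) (steps : List String), c.toNat < fuel →
    showStepsLoop fuel c steps = steps ++ show_steps_alt c := by
  intro fuel
  induction fuel with
  | zero => intro c steps h; omega
  | succ f ih =>
    intro c steps h
    rw [showStepsLoop]
    unfold show_steps_alt
    rw [showStepsAltGo]
    by_cases hc : c ≥ 10
    · rw [if_pos hc, if_neg (by omega)]
      simp only
      have hds : sumDigitsLoop c.toNat 0 c = strDigitSum c := sums_agree c (by omega)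
      have hlt := strDigitSum_lt c (by omega)
      rw [ih _ _ (by omega), hds]
      unfold show_steps_alt
      rw [altGo_congr ((strDigitSum c).toNat + 1) c.toNat (strDigitSum c) (by omega) (by omega)]
      simp
    · rw [if_neg hc, if_pos (by omega)]

-- ===== VERDICT (by name: the statement is the Claim_ definition above) =====
theorem show_steps_spec : Claim_equal_show_steps := by
  intro num _
  unfold Spec_show_steps show_steps
  rw [loop_eq (num.toNat + 1) num [] (by omega)]
  simp
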